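-- pv_equiv track=rewrite | github.com/deferredreward/translation-note-writer | transfer/modules/batch_processor.py | _post_process_text_legacy
-- ===== SOURCE A (Python) =====
-- def _post_process_text_legacy(text: str) -> str:
--     """Post-process text by removing curly braces and converting straight quotes to smart quotes.
--
--     Args:
--         text: Input text to process
--
--     Returns:
--         Processed text with curly braces removed and smart quotes
--     """
--     if not text:
--         return text
--
--     # Remove all curly braces
--     processed = text.replace('{', '').replace('}', '')
--
--     # Convert straight quotes to smart quotes
--     # This handles nested quotes and alternates between single and double quotes appropriately
--
--     # First handle double quotes
--     # Use a simple state machine to alternate between opening and closing quotes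
--     result = []
--     in_double_quotes = False
--     i = 0
--
--     while i < len(processed):
--         char = processed[i]
--
--         if char == '"':
--             if in_double_quotes:
--                 # Closing double quote
--                 result.append('\u201D')  # RIGHT DOUBLE QUOTATION MARK
--                 in_double_quotes = False
--             else:
--                 # Opening double quote
--                 result.append('\u201C')  # LEFT DOUBLE QUOTATION MARK
--                 in_double_quotes = True
--         elif char == "'":
--             # For single quotes, check context to determine if it's an apostrophe or quote
--             if i > 0 and processed[i-1].isalnum():
--                 # Likely an apostrophe (preceded by alphanumeric)
--                 result.append('\u2019')  # RIGHT SINGLE QUOTATION MARK (apostrophe)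
--             elif i < len(processed) - 1 and processed[i+1].isalnum():
--                 # Likely opening single quote (followed by alphanumeric)
--                 result.append('\u2018')  # LEFT SINGLE QUOTATION MARK
--             else:
--                 # Default to closing single quote
--                 result.append('\u2019')  # RIGHT SINGLE QUOTATION MARK
--         else:
--             result.append(char)
--
--         i += 1
--
--     return ''.join(result)
-- ===== SOURCE B (Python) =====
-- def _post_process_text_legacy(text: str) -> str:
--     if not text:
--         return text
--
--     # Remove all curly braces
--     s = text.replace('{', '').replace('}', '')
--
--     # Pass 1: split on '"'; the k-th separator (1-based) opens when k is odd,
--     # closes when it is even.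
--     parts = s.split('"')
--     s = parts[0]
--     for k in range(1, len(parts)):
--         s += ('\u201C' if k % 2 == 1 else '\u201D') + parts[k]
--
--     # Pass 2: split on "'"; a quote after an alphanumeric char is an
--     # apostrophe, else before an alphanumeric char it opens, else it closes.
--     pieces = s.split("'")
--     out = pieces[0]
--     for piece in pieces[1:]:
--         if out and out[-1].isalnum():
--             out += '\u2019' + piece
--         elif piece and piece[0].isalnum():
--             out += '\u2018' + piece
--         else:
--             out += '\u2019' + piece
--     return out
-- ===== Notes on version B (the rewrite author's own statement) =====
-- stated objective: faster
-- what changed: A's single indexed while-loop state machine is replaced by two split/join passes over the brace-stripped string: split on double quotes and rejoin alternating opening/closing smart quotes by part parity, then split on single quotes and rejoin choosing apostrophe/open/close from the last char emitted so far and the first char of the next piece.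
import Mathlib
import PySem

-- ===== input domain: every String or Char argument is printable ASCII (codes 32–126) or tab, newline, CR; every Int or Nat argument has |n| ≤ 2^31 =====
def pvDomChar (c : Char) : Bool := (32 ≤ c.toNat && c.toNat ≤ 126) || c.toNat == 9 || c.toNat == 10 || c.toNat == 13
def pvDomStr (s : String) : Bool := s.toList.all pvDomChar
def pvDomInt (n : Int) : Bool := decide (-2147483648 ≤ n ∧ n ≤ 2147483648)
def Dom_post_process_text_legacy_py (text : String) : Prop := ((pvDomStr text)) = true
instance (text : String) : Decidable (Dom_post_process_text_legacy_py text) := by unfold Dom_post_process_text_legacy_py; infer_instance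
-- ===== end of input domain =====

-- B replaces A's single indexed state-machine loop by two split/join passes
-- over the brace-stripped string (alternate “/” between the '"'-split parts,
-- then rejoin the "'"-split pieces choosing the quote from the neighbours);
-- objective: faster in CPython (C-level split/join instead of a per-char Python loop), measured.


-- ===== PORT A =====
-- A's while-loop: index i over `processed`, appending to `result`;
-- processed[i-1] / processed[i+1] are read via getD under the same guards Python uses.
def pvALoop (processed : List Char) (i : Nat) (inDq : Bool) (acc : List Char) : List Char :=
  if h : i < processed.length then
    let char := processed[i]
    if char = '"' then
      if inDq then pvALoop processed (i + 1) false (acc ++ ['\u201D'])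
      else pvALoop processed (i + 1) true (acc ++ ['\u201C'])
    else if char = '\'' then
      if decide (0 < i) && PySem.Chars.isalnum (processed.getD (i - 1) ' ') then
        pvALoop processed (i + 1) inDq (acc ++ ['\u2019'])
      else if decide (i + 1 < processed.length) && PySem.Chars.isalnum (processed.getD (i + 1) ' ') then
        pvALoop processed (i + 1) inDq (acc ++ ['\u2018'])
      else
        pvALoop processed (i + 1) inDq (acc ++ ['\u2019'])
    else pvALoop processed (i + 1) inDq (acc ++ [char])
  else acc
termination_by processed.length - i

def post_process_text_legacy_py (text : String) : String :=
  if text = "" then text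
  else
    let processed := PySem.Chars.replace (PySem.Chars.replace text.toList ['{'] []) ['}'] []
    String.ofList (pvALoop processed 0 false [])

-- ===== PORT B =====
-- `o.map isalnum |>.getD false` = Python's `x and x.isalnum()` on an optional char.
def pvAlnumO (o : Option Char) : Bool := (o.map PySem.Chars.isalnum).getD false

-- pass 1 rejoin: the k-th '"' (1-based) becomes “ when k is odd, ” when even
def pvDqJoin (k : Nat) : List (List Char) → List Char
  | [] => []
  | p :: rest => (if k % 2 = 1 then '\u201C' else '\u201D') :: (p ++ pvDqJoin (k + 1) rest)

-- pass 2 rejoin: quote chosen from the last char so far / first char of the next piece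
def pvSqJoin (out : List Char) : List (List Char) → List Char
  | [] => out
  | piece :: rest =>
    let q := if pvAlnumO out.getLast? then '\u2019'
             else if pvAlnumO piece.head? then '\u2018'
             else '\u2019'
    pvSqJoin (out ++ q :: piece) rest

def post_process_text_legacy_py_alt (text : String) : String :=
  if text = "" then text
  else
    let s := PySem.Chars.replace (PySem.Chars.replace text.toList ['{'] []) ['}'] []
    let parts := s.splitOn '"'
    let s2 := parts.headD [] ++ pvDqJoin 1 parts.tail
    let pieces := s2.splitOn '\''
    String.ofList (pvSqJoin (pieces.headD []) pieces.tail)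

-- ===== PRECONDITION & SPEC =====
def Spec_post_process_text_legacy_py (text : String) (out : String) : Prop := out = post_process_text_legacy_py_alt text
instance (text : String) (out : String) : Decidable (Spec_post_process_text_legacy_py text out) := by unfold Spec_post_process_text_legacy_py; infer_instance

-- ===== CLAIM (what is proved, stated in full; the proofs are below) =====
def Claim_equal_post_process_text_legacy_py : Prop := ∀ (text : String), Dom_post_process_text_legacy_py text → Spec_post_process_text_legacy_py text (post_process_text_legacy_py text)

-- ===== LEMMAS AND PROOFS =====

-- reference single passes (proof-only)
def pvP1 (inDq : Bool) : List Char → List Char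
  | [] => []
  | c :: t =>
    (if c = '"' then (if inDq then '\u201D' else '\u201C') else c)
      :: pvP1 (if c = '"' then !inDq else inDq) t

def pvP2 (pa : Bool) : List Char → List Char
  | [] => []
  | c :: t =>
    (if c = '\'' then (if pa then '\u2019' else if pvAlnumO t.head? then '\u2018' else '\u2019') else c)
      :: pvP2 (PySem.Chars.isalnum c) t

-- combined single pass = what A computes per position
def pvF (pa inDq : Bool) : List Char → List Char
  | [] => []
  | c :: t =>
    (if c = '"' then (if inDq then '\u201D' else '\u201C')
     else if c = '\'' then (if pa then '\u2019' else if pvAlnumO t.head? then '\u2018' else '\u2019')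
     else c)
      :: pvF (PySem.Chars.isalnum c) (if c = '"' then !inDq else inDq) t

def pvPaAt (l : List Char) (i : Nat) : Bool :=
  if 0 < i then PySem.Chars.isalnum (l.getD (i - 1) ' ') else false

theorem pvAlnumO_head_drop (l : List Char) (j : Nat) :
    pvAlnumO (l.drop j).head? = (decide (j < l.length) && PySem.Chars.isalnum (l.getD j ' ')) := by
  by_cases h : j < l.length
  · rw [List.drop_eq_getElem_cons h]
    simp [pvAlnumO, h, List.getD_eq_getElem?_getD, List.getElem?_eq_getElem h]
  · simp [List.drop_of_length_le (Nat.le_of_not_lt h), pvAlnumO, h]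

theorem pvALoop_eq_F (l : List Char) (i : Nat) (inDq : Bool) (acc : List Char) (hi : i ≤ l.length) :
    pvALoop l i inDq acc = acc ++ pvF (pvPaAt l i) inDq (l.drop i) := by
  by_cases h : i < l.length
  · have hdrop : l.drop i = l[i] :: l.drop (i + 1) := List.drop_eq_getElem_cons h
    have hpa1 : pvPaAt l (i + 1) = PySem.Chars.isalnum l[i] := by
      simp [pvPaAt, List.getD_eq_getElem?_getD, List.getElem?_eq_getElem h]
    have hnext : pvAlnumO (l.drop (i + 1)).head?
        = (decide (i + 1 < l.length) && PySem.Chars.isalnum (l.getD (i + 1) ' ')) :=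
      pvAlnumO_head_drop l (i + 1)
    have hpaA : (decide (0 < i) && PySem.Chars.isalnum (l.getD (i - 1) ' ')) = pvPaAt l i := by
      by_cases h0 : 0 < i <;> simp [pvPaAt, h0]
    rw [pvALoop, hdrop]
    by_cases hq : l[i] = '"'
    · by_cases hd : inDq <;>
        simp only [h, dif_pos, hq, if_pos, hd, if_true, if_false, Bool.not_true, Bool.not_false,
          pvALoop_eq_F l (i + 1) _ _ h, pvF, hpa1] <;> simp [hq]
    · by_cases hs : l[i] = '\''
      · rw [hpaA]
        by_cases hpa : pvPaAt l i = true
        · simp only [h, dif_pos, hq, if_neg, hs, if_pos, hpa, Bool.true_and,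
            pvALoop_eq_F l (i + 1) _ _ h, pvF, hpa1]
          simp [hq, hs, hpa, hnext]
        · have hpa' : pvPaAt l i = false := by revert hpa; cases pvPaAt l i <;> simp
          by_cases hnx : (decide (i + 1 < l.length) && PySem.Chars.isalnum (l.getD (i + 1) ' ')) = true
          · have hnx2 : (i + 1 < l.length) ∧ PySem.Chars.isalnum (l.getD (i + 1) ' ') = true := by
              simpa using hnx
            have h4 : pvAlnumO (l.drop (i + 1)).head? = true := by rw [hnext, hnx]
            simp only [h, dif_pos, hq, if_neg, hs, if_pos, hpa', Bool.false_eq_true, hnx,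
              pvALoop_eq_F l (i + 1) _ _ h, pvF, hpa1]
            simp [hq, hs, hpa', h4, ← List.head?_drop]
          · have hnx' : (decide (i + 1 < l.length) && PySem.Chars.isalnum (l.getD (i + 1) ' ')) = false := by
              revert hnx; cases (decide (i + 1 < l.length) && PySem.Chars.isalnum (l.getD (i + 1) ' ')) <;> simp
            have h4 : pvAlnumO (l.drop (i + 1)).head? = false := by rw [hnext, hnx']
            simp only [h, dif_pos, hq, if_neg, hs, if_pos, hpa', Bool.false_eq_true, hnx',
              pvALoop_eq_F l (i + 1) _ _ h, pvF, hpa1]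
            simp [hq, hs, hpa', h4, ← List.head?_drop]
      · simp only [h, dif_pos, hq, hs, if_neg, pvALoop_eq_F l (i + 1) _ _ h, pvF, hpa1]
        simp [hq, hs]
  · have : l.drop i = [] := List.drop_of_length_le (Nat.le_of_not_lt h)
    rw [pvALoop]
    simp [h, this, pvF]
termination_by l.length - i

-- splitOn cons equations (single-char separator)
theorem pvSplitOn_nil (c : Char) : ([] : List Char).splitOn c = [[]] := by
  simp [List.splitOn, List.splitOnP, List.splitOnP.go]

theorem pvSplitOn_cons_eq (c : Char) (t : List Char) :
    (c :: t).splitOn c = [] :: t.splitOn c := by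
  simp [List.splitOn, List.splitOnP_cons]

theorem pvSplitOn_cons_ne (a c : Char) (t : List Char) (h : a ≠ c) :
    (a :: t).splitOn c = (t.splitOn c).modifyHead (a :: ·) := by
  simp [List.splitOn, List.splitOnP_cons, h]

theorem pvSplitOn_ne_nil (c : Char) (t : List Char) : t.splitOn c ≠ [] :=
  List.splitOnP_ne_nil (fun x => x == c) t

-- pvDqJoin only depends on the parity of its index
theorem pvDqJoin_parity (parts : List (List Char)) (k k' : Nat) (h : k % 2 = k' % 2) :
    pvDqJoin k parts = pvDqJoin k' parts := by
  induction parts generalizing k k' with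
  | nil => rfl
  | cons p rest ih =>
    simp only [pvDqJoin, h, ih (k + 1) (k' + 1) (by omega)]

-- a quote char is never alphanumeric
theorem pvQ_not_alnum (a b : Bool) :
    PySem.Chars.isalnum (if a then '\u2019' else if b then '\u2018' else '\u2019') = false := by
  cases a <;> cases b <;> decide

-- pass 1: split/join on '"' computes pvP1
theorem pvL1 (s : List Char) (inDq : Bool) :
    (s.splitOn '"').headD [] ++ pvDqJoin (if inDq then 2 else 1) (s.splitOn '"').tail
      = pvP1 inDq s := by
  induction s generalizing inDq with
  | nil => simp [pvSplitOn_nil, pvDqJoin, pvP1]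
  | cons c t ih =>
    by_cases hq : c = '"'
    · subst hq
      rw [pvSplitOn_cons_eq]
      obtain ⟨h, tl, hht⟩ : ∃ h tl, t.splitOn '"' = h :: tl := by
        cases e : t.splitOn '"' with
        | nil => exact absurd e (pvSplitOn_ne_nil _ t)
        | cons h tl => exact ⟨h, tl, rfl⟩
      have hIH := ih (!inDq)
      rw [hht] at hIH
      simp only [List.headD, List.tail] at hIH
      have hpar : pvDqJoin ((if inDq then 2 else 1) + 1) tl
          = pvDqJoin (if !inDq then 2 else 1) tl := by
        apply pvDqJoin_parity; cases inDq <;> simp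
      simp only [List.headD, List.tail, hht, pvDqJoin, List.nil_append]
      rw [hpar, hIH]
      cases inDq <;> simp [pvP1]
    · rw [pvSplitOn_cons_ne c '"' t hq]
      obtain ⟨h, tl, hht⟩ : ∃ h tl, t.splitOn '"' = h :: tl := by
        cases e : t.splitOn '"' with
        | nil => exact absurd e (pvSplitOn_ne_nil _ t)
        | cons h tl => exact ⟨h, tl, rfl⟩
      have hIH := ih inDq
      rw [hht] at hIH
      simp only [List.headD, List.tail] at hIH
      simp only [hht, List.modifyHead, List.headD, List.tail, pvP1, if_neg hq]
      rw [List.cons_append, hIH]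

-- pass 2: split/join on '\'' computes pvP2
theorem pvL2 (s : List Char) (out : List Char) :
    pvSqJoin (out ++ (s.splitOn '\'').headD []) (s.splitOn '\'').tail
      = out ++ pvP2 (pvAlnumO out.getLast?) s := by
  induction s generalizing out with
  | nil => simp [pvSplitOn_nil, pvSqJoin, pvP2]
  | cons c t ih =>
    by_cases hq : c = '\''
    · subst hq
      rw [pvSplitOn_cons_eq]
      obtain ⟨h, tl, hht⟩ : ∃ h tl, t.splitOn '\'' = h :: tl := by
        cases e : t.splitOn '\'' with
        | nil => exact absurd e (pvSplitOn_ne_nil _ t)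
        | cons h tl => exact ⟨h, tl, rfl⟩
      have hhead : pvAlnumO h.head? = pvAlnumO t.head? := by
        cases t with
        | nil => rw [pvSplitOn_nil] at hht; cases hht; simp
        | cons c' t' =>
          by_cases hc' : c' = '\''
          · subst hc'; rw [pvSplitOn_cons_eq] at hht
            cases hht; simp [pvAlnumO]; decide
          · rw [pvSplitOn_cons_ne c' '\'' t' hc'] at hht
            obtain ⟨h2, tl2, hht2⟩ : ∃ h2 tl2, t'.splitOn '\'' = h2 :: tl2 := by
              cases e : t'.splitOn '\'' with
              | nil => exact absurd e (pvSplitOn_ne_nil _ t')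
              | cons h2 tl2 => exact ⟨h2, tl2, rfl⟩
            rw [hht2] at hht
            simp only [List.modifyHead] at hht
            cases hht; simp
      simp only [List.headD, List.tail, hht, pvSqJoin, List.append_nil]
      set q : Char := if pvAlnumO out.getLast? then '\u2019'
          else if pvAlnumO h.head? then '\u2018' else '\u2019' with hqdef
      have happ : out ++ q :: h = (out ++ [q]) ++ h := by simp
      have := ih (out ++ [q])
      rw [hht] at this
      simp only [List.headD, List.tail] at this
      rw [happ, this]
      have hqal : pvAlnumO (out ++ [q]).getLast? = false := by
        rw [List.getLast?_append_cons]
        simp only [List.getLast?_singleton, Option.getD_some, pvAlnumO, Option.map_some]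
        rw [hqdef]
        exact pvQ_not_alnum _ _
      rw [hqal]
      simp only [pvP2, if_pos rfl, hqdef, hhead]
      have : PySem.Chars.isalnum '\'' = false := by decide
      rw [this]
      simp
    · rw [pvSplitOn_cons_ne c '\'' t hq]
      obtain ⟨h, tl, hht⟩ : ∃ h tl, t.splitOn '\'' = h :: tl := by
        cases e : t.splitOn '\'' with
        | nil => exact absurd e (pvSplitOn_ne_nil _ t)
        | cons h tl => exact ⟨h, tl, rfl⟩
      have happ : out ++ c :: h = (out ++ [c]) ++ h := by simp
      have := ih (out ++ [c])
      rw [hht] at this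
      simp only [List.headD, List.tail] at this
      simp only [hht, List.modifyHead, List.headD, List.tail]
      rw [happ, this]
      have : pvAlnumO (out ++ [c]).getLast? = PySem.Chars.isalnum c := by
        rw [List.getLast?_append_cons]; simp [pvAlnumO]
      rw [this]
      simp [pvP2, hq]

-- pvP1 keeps the head's alnum status
theorem pvP1_head_alnum (t : List Char) (inDq : Bool) :
    pvAlnumO (pvP1 inDq t).head? = pvAlnumO t.head? := by
  cases t with
  | nil => rfl
  | cons c t' =>
    by_cases hq : c = '"'
    · subst hq; cases inDq <;> simp [pvP1, pvAlnumO] <;> decide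
    · simp [pvP1, hq]

-- composing the two passes gives the combined pass
theorem pvP2_P1_eq_F (s : List Char) (pa inDq : Bool) :
    pvP2 pa (pvP1 inDq s) = pvF pa inDq s := by
  induction s generalizing pa inDq with
  | nil => rfl
  | cons c t ih =>
    by_cases hq : c = '"'
    · subst hq
      have e1 : PySem.Chars.isalnum '\u201D' = false := by decide
      have e2 : PySem.Chars.isalnum '\u201C' = false := by decide
      have e3 : PySem.Chars.isalnum '"' = false := by decide
      cases inDq <;> simp [pvP1, pvP2, pvF, ih, e1, e2, e3]
    · by_cases hs : c = '\''
      · subst hs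
        have e4 : PySem.Chars.isalnum '\'' = false := by decide
        simp [pvP1, pvP2, pvF, ih, pvP1_head_alnum, e4]
      · simp [pvP1, pvP2, pvF, ih, hq, hs]

-- ===== VERDICT (by name: the statement is the Claim_ definition above) =====
theorem post_process_text_legacy_py_spec : Claim_equal_post_process_text_legacy_py := by
  intro text _
  unfold Spec_post_process_text_legacy_py post_process_text_legacy_py post_process_text_legacy_py_alt
  by_cases h : text = ""
  · simp [h]
  · simp only [h, if_false]
    set p := PySem.Chars.replace (PySem.Chars.replace text.toList ['{'] []) ['}'] [] with hp
    have hA : pvALoop p 0 false [] = pvF false false p := by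
      have := pvALoop_eq_F p 0 false [] (Nat.zero_le _)
      simpa [pvPaAt] using this
    have h1 := pvL1 p false
    simp only [Bool.false_eq_true, if_false] at h1
    have h2 := pvL2 (pvP1 false p) []
    simp only [List.nil_append, List.getLast?_nil] at h2
    have h0 : pvAlnumO none = false := rfl
    rw [h0] at h2
    rw [hA, h1, h2, pvP2_P1_eq_F]
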